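-- pv_equiv track=rewrite | github.com/therealsahil19/webspace | src/processing/conflict_detector.py | _is_status_conflict
-- ===== SOURCE A (Python) =====
-- def _is_status_conflict(status1: str, status2: str) -> bool:
--     """Check if two status values conflict with status equivalence."""
--     # Normalize status values
--     status_equivalents = {
--         'success': ['successful', 'completed'],
--         'failure': ['failed', 'unsuccessful'],
--         'upcoming': ['scheduled', 'planned'],
--         'aborted': ['cancelled', 'canceled', 'scrubbed'],
--         'in_flight': ['in-flight', 'active', 'flying']
--     }
--
--     norm1 = str(status1).lower().strip()
--     norm2 = str(status2).lower().strip()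
--
--     # Direct match
--     if norm1 == norm2:
--         return False
--
--     # Check equivalents
--     for canonical, equivalents in status_equivalents.items():
--         group = [canonical] + equivalents
--         if norm1 in group and norm2 in group:
--             return False
--
--     return True
-- ===== SOURCE B (Python) =====
-- # Flat alias -> canonical map; each status canonicalizes in one lookup.
-- _CANON = {
--     'success': 'success', 'successful': 'success', 'completed': 'success',
--     'failure': 'failure', 'failed': 'failure', 'unsuccessful': 'failure',
--     'upcoming': 'upcoming', 'scheduled': 'upcoming', 'planned': 'upcoming',
--     'aborted': 'aborted', 'cancelled': 'aborted', 'canceled': 'aborted',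
--     'scrubbed': 'aborted',
--     'in_flight': 'in_flight', 'in-flight': 'in_flight', 'active': 'in_flight',
--     'flying': 'in_flight',
-- }
--
--
-- def _canon(status) -> str:
--     n = str(status).lower().strip()
--     return _CANON.get(n, n)
--
--
-- def _is_status_conflict(status1: str, status2: str) -> bool:
--     """Check if two status values conflict with status equivalence."""
--     return _canon(status1) != _canon(status2)
-- ===== Notes on version B (the rewrite author's own statement) =====
-- stated objective: idiomatic
-- what changed: Replaces the per-call scan over nested equivalence groups (building each group list and testing both statuses against it) with a flat alias-to-canonical dict: each status is canonicalized by one lookup (unknowns map to themselves) and the two canonical forms are compared for inequality.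
import Mathlib
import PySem

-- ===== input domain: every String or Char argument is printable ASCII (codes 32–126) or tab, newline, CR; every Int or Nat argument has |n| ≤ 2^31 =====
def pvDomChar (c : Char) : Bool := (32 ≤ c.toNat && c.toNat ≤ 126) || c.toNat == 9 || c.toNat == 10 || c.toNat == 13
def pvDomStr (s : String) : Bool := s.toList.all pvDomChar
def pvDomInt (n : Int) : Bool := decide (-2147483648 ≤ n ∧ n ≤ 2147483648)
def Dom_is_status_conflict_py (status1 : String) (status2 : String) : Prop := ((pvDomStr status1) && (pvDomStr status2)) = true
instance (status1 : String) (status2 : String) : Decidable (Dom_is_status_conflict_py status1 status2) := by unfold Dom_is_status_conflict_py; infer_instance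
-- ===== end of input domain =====

-- B replaces A's per-call scan over nested equivalence groups with a flat
-- alias→canonical dict: each status canonicalizes in one lookup (unknowns map to
-- themselves) and the canonical forms are compared (objective: idiomatic).

-- ===== PORT A =====
-- the status_equivalents dict literal of A
def pvTableA : List (String × List String) :=
  [("success", ["successful", "completed"]),
   ("failure", ["failed", "unsuccessful"]),
   ("upcoming", ["scheduled", "planned"]),
   ("aborted", ["cancelled", "canceled", "scrubbed"]),
   ("in_flight", ["in-flight", "active", "flying"])]

-- the 'for canonical, equivalents in status_equivalents.items()' loop with its early 'return False'
def pvCheckGroups : List (String × List String) → String → String → Bool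
  | [], _, _ => false
  | (canonical, equivalents) :: rest, n1, n2 =>
    let group := canonical :: equivalents   -- [canonical] + equivalents
    if group.contains n1 && group.contains n2 then true else pvCheckGroups rest n1 n2

def is_status_conflict_py (status1 : String) (status2 : String) : Bool :=
  let norm1 := PySem.Str.strip (PySem.Str.lower status1)
  let norm2 := PySem.Str.strip (PySem.Str.lower status2)
  if norm1 == norm2 then false
  else if pvCheckGroups pvTableA norm1 norm2 then false
  else true

-- ===== PORT B =====
-- B's module-level flat alias→canonical dict literal _CANON
def pvCanonMap : PySem.Dict String String :=
  PySem.Dict.ofList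
    [("success", "success"), ("successful", "success"), ("completed", "success"),
     ("failure", "failure"), ("failed", "failure"), ("unsuccessful", "failure"),
     ("upcoming", "upcoming"), ("scheduled", "upcoming"), ("planned", "upcoming"),
     ("aborted", "aborted"), ("cancelled", "aborted"), ("canceled", "aborted"),
     ("scrubbed", "aborted"),
     ("in_flight", "in_flight"), ("in-flight", "in_flight"), ("active", "in_flight"),
     ("flying", "in_flight")]

-- B's helper _canon
def pvCanon (status : String) : String :=
  let n := PySem.Str.strip (PySem.Str.lower status)
  pvCanonMap.getD n n

def is_status_conflict_py_alt (status1 : String) (status2 : String) : Bool :=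
  !(pvCanon status1 == pvCanon status2)

-- ===== PRECONDITION & SPEC =====
def Spec_is_status_conflict_py (status1 : String) (status2 : String) (out : Bool) : Prop := out = is_status_conflict_py_alt status1 status2
instance (status1 : String) (status2 : String) (out : Bool) : Decidable (Spec_is_status_conflict_py status1 status2 out) := by unfold Spec_is_status_conflict_py; infer_instance

-- ===== CLAIM (what is proved, stated in full; the proofs are below) =====
def Claim_equal_is_status_conflict_py : Prop := ∀ (status1 : String) (status2 : String), Dom_is_status_conflict_py status1 status2 → Spec_is_status_conflict_py status1 status2 (is_status_conflict_py status1 status2)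

-- ===== LEMMAS AND PROOFS =====

-- the canonicalization B's lookup computes, written out as an if-chain (proof helper)
def pvCls (n : String) : String :=
  if n = "flying" then "in_flight" else if n = "active" then "in_flight"
  else if n = "in-flight" then "in_flight" else if n = "in_flight" then "in_flight"
  else if n = "scrubbed" then "aborted" else if n = "canceled" then "aborted"
  else if n = "cancelled" then "aborted" else if n = "aborted" then "aborted"
  else if n = "planned" then "upcoming" else if n = "scheduled" then "upcoming"
  else if n = "upcoming" then "upcoming"
  else if n = "unsuccessful" then "failure" else if n = "failed" then "failure"
  else if n = "failure" then "failure"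
  else if n = "completed" then "success" else if n = "successful" then "success"
  else if n = "success" then "success"
  else n

lemma pvCanonMap_getD (n : String) : pvCanonMap.getD n n = pvCls n := by
  simp only [pvCanonMap, PySem.Dict.ofList, PySem.Dict.update, List.foldl]
  simp only [PySem.Dict.getD_insert, PySem.Dict.getD_empty, pvCls]

lemma pvCls_eq_of_mem {p : String × List String} (hp : p ∈ pvTableA) {n : String}
    (hn : n ∈ p.1 :: p.2) : pvCls n = p.1 := by
  fin_cases hp <;> simp_all <;> rcases hn with rfl | rfl | rfl | rfl <;> rfl

lemma pvCls_cases (n : String) :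
    pvCls n = n ∨ ∃ p ∈ pvTableA, n ∈ p.1 :: p.2 ∧ pvCls n = p.1 := by
  by_cases h0 : n = "flying"
  · subst h0; exact Or.inr ⟨("in_flight", ["in-flight", "active", "flying"]), by decide, by decide, by decide⟩
  by_cases h1 : n = "active"
  · subst h1; exact Or.inr ⟨("in_flight", ["in-flight", "active", "flying"]), by decide, by decide, by decide⟩
  by_cases h2 : n = "in-flight"
  · subst h2; exact Or.inr ⟨("in_flight", ["in-flight", "active", "flying"]), by decide, by decide, by decide⟩
  by_cases h3 : n = "in_flight"
  · subst h3; exact Or.inr ⟨("in_flight", ["in-flight", "active", "flying"]), by decide, by decide, by decide⟩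
  by_cases h4 : n = "scrubbed"
  · subst h4; exact Or.inr ⟨("aborted", ["cancelled", "canceled", "scrubbed"]), by decide, by decide, by decide⟩
  by_cases h5 : n = "canceled"
  · subst h5; exact Or.inr ⟨("aborted", ["cancelled", "canceled", "scrubbed"]), by decide, by decide, by decide⟩
  by_cases h6 : n = "cancelled"
  · subst h6; exact Or.inr ⟨("aborted", ["cancelled", "canceled", "scrubbed"]), by decide, by decide, by decide⟩
  by_cases h7 : n = "aborted"
  · subst h7; exact Or.inr ⟨("aborted", ["cancelled", "canceled", "scrubbed"]), by decide, by decide, by decide⟩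
  by_cases h8 : n = "planned"
  · subst h8; exact Or.inr ⟨("upcoming", ["scheduled", "planned"]), by decide, by decide, by decide⟩
  by_cases h9 : n = "scheduled"
  · subst h9; exact Or.inr ⟨("upcoming", ["scheduled", "planned"]), by decide, by decide, by decide⟩
  by_cases h10 : n = "upcoming"
  · subst h10; exact Or.inr ⟨("upcoming", ["scheduled", "planned"]), by decide, by decide, by decide⟩
  by_cases h11 : n = "unsuccessful"
  · subst h11; exact Or.inr ⟨("failure", ["failed", "unsuccessful"]), by decide, by decide, by decide⟩
  by_cases h12 : n = "failed"
  · subst h12; exact Or.inr ⟨("failure", ["failed", "unsuccessful"]), by decide, by decide, by decide⟩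
  by_cases h13 : n = "failure"
  · subst h13; exact Or.inr ⟨("failure", ["failed", "unsuccessful"]), by decide, by decide, by decide⟩
  by_cases h14 : n = "completed"
  · subst h14; exact Or.inr ⟨("success", ["successful", "completed"]), by decide, by decide, by decide⟩
  by_cases h15 : n = "successful"
  · subst h15; exact Or.inr ⟨("success", ["successful", "completed"]), by decide, by decide, by decide⟩
  by_cases h16 : n = "success"
  · subst h16; exact Or.inr ⟨("success", ["successful", "completed"]), by decide, by decide, by decide⟩
  · exact Or.inl (by unfold pvCls; simp [h0, h1, h2, h3, h4, h5, h6, h7, h8, h9, h10, h11, h12, h13, h14, h15, h16])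

lemma pvCheckGroups_iff_gen (L : List (String × List String)) (n1 n2 : String) :
    pvCheckGroups L n1 n2 = true ↔
      ∃ p ∈ L, n1 ∈ p.1 :: p.2 ∧ n2 ∈ p.1 :: p.2 := by
  induction L with
  | nil => simp [pvCheckGroups]
  | cons p rest ih =>
    obtain ⟨c, eqs⟩ := p
    simp only [pvCheckGroups]
    by_cases h : (((c :: eqs).contains n1) && ((c :: eqs).contains n2)) = true
    · rw [if_pos h]
      simp only [Bool.and_eq_true, List.contains_eq_mem, decide_eq_true_eq] at h
      simp only [true_iff]
      exact ⟨(c, eqs), List.mem_cons_self .., h.1, h.2⟩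
    · rw [if_neg h, ih]
      simp only [Bool.and_eq_true, List.contains_eq_mem, decide_eq_true_eq, not_and] at h
      constructor
      · rintro ⟨q, hq, h1, h2⟩; exact ⟨q, List.mem_cons_of_mem _ hq, h1, h2⟩
      · rintro ⟨q, hq, h1, h2⟩
        rcases List.mem_cons.mp hq with heq | hq'
        · subst heq; exact absurd h2 (h h1)
        · exact ⟨q, hq', h1, h2⟩

lemma pv_key (n1 n2 : String) :
    (n1 = n2 ∨ pvCheckGroups pvTableA n1 n2 = true) ↔ pvCls n1 = pvCls n2 := by
  rw [pvCheckGroups_iff_gen]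
  constructor
  · rintro (rfl | ⟨p, hp, h1, h2⟩)
    · rfl
    · rw [pvCls_eq_of_mem hp h1, pvCls_eq_of_mem hp h2]
  · intro h
    rcases pvCls_cases n1 with e1 | ⟨p, hp, hm1, hc1⟩
    · rcases pvCls_cases n2 with e2 | ⟨q, hq, hm2, hc2⟩
      · left; rw [← e1, ← e2, h]
      · right
        have hn1 : n1 = q.1 := by rw [← e1, h, hc2]
        exact ⟨q, hq, by rw [hn1]; exact List.mem_cons_self .., hm2⟩
    · rcases pvCls_cases n2 with e2 | ⟨q, hq, hm2, hc2⟩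
      · right
        have hn2 : n2 = p.1 := by rw [← e2, ← h, hc1]
        exact ⟨p, hp, hm1, by rw [hn2]; exact List.mem_cons_self ..⟩
      · right
        have hpq : p.1 = q.1 := by rw [← hc1, h, hc2]
        have hpe : p = q := by
          revert hpq
          fin_cases hp <;> fin_cases hq <;> decide
        exact ⟨p, hp, hm1, by rw [hpe]; exact hm2⟩

-- ===== VERDICT (by name: the statement is the Claim_ definition above) =====
theorem is_status_conflict_py_spec : Claim_equal_is_status_conflict_py := by
  intro s1 s2 _
  unfold Spec_is_status_conflict_py is_status_conflict_py is_status_conflict_py_alt pvCanon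
  simp only [pvCanonMap_getD]
  by_cases h : pvCls (PySem.Str.strip (PySem.Str.lower s1)) = pvCls (PySem.Str.strip (PySem.Str.lower s2))
  · rcases (pv_key _ _).mpr h with he | hcg
    · simp [he]
    · simp [hcg, h]
  · have hne : PySem.Str.strip (PySem.Str.lower s1) ≠ PySem.Str.strip (PySem.Str.lower s2) :=
      fun e => h (by rw [e])
    have hcg : pvCheckGroups pvTableA (PySem.Str.strip (PySem.Str.lower s1)) (PySem.Str.strip (PySem.Str.lower s2)) = false := by
      cases e : pvCheckGroups pvTableA (PySem.Str.strip (PySem.Str.lower s1)) (PySem.Str.strip (PySem.Str.lower s2))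
      · rfl
      · exact absurd ((pv_key _ _).mp (Or.inr e)) h
    simp [hne, hcg, h]
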